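-- pv_equiv track=rewrite | github.com/FilouPlains/block_selfies | scripts/fragment_SELFIES.py | token_classify
-- ===== SOURCE A (Python) =====
-- def find_int(token):
--     for character in token:
--                 if character.isdigit():
--                     return int(character)
--                 else:
--                     pass
--
-- def get_numeric_value(token):
--     num_dict={
--         "[C]" : 0,
--         "[Ring1]" : 1,
--         "[Ring2]" : 2,
--         "[Branch1]" : 3,
--         "[=Branch1]" : 4,
--         "[#Branch1]" : 5,
--         "[Branch2]" : 6,
--         "[=Branch2]" : 7,
--         "[#Branch2]" : 8,
--         "[O]" : 9,
--         "[N]" : 10,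
--         "[=N]" : 11,
--         "[=C]" : 12,
--         "[#C]" : 13,
--         "[S]" : 14,
--         "[P]" : 15
--     }
--     value = num_dict[token]
--     return value
--
-- def calculate_len_connect(i,nb_num_token,selfies_token):
--     num=0
--     skip_idx=[]
--     for j in range(1,nb_num_token+1):
--         skip_idx.append(i+j)
--         num+=get_numeric_value(selfies_token[i+j]) * (16**(nb_num_token-j))
--     num+=1
--     return num,skip_idx
--
-- def token_classify (selfies_token):
--
--     ### initialization of lists
--     atoms_idx_list=[]
--     branch_idx_list=[]
--     ring_idx_list=[]
--     skip_list=[]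
--
--     for i,token in enumerate(selfies_token):
--         if i in skip_list:
--             continue
--
--         if token.find("Branch") !=-1:
--             nb_num_token=find_int(token)
--             num,skip_idx=calculate_len_connect(i,nb_num_token,selfies_token)
--             skip_list.extend(skip_idx)
--             branch_idx_list.append([i,nb_num_token,num])
--
--         elif token.find("Ring")!=-1:
--             nb_num_token= find_int(token)
--             num,skip_idx=calculate_len_connect(i,nb_num_token,selfies_token)
--             skip_list.extend(skip_idx)
--             ring_idx_list.append([i,nb_num_token,num])
--
--         else:
--           atoms_idx_list.append(i)
--
--     return atoms_idx_list,branch_idx_list,ring_idx_list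
-- ===== SOURCE B (Python) =====
-- # B: single cursor-driven while loop; the skip_list of A disappears because the
-- # numeric tokens consumed by a Branch/Ring token are always the contiguous block
-- # right after it, so we just jump the cursor past them.
--
-- def find_int(token):
--     for character in token:
--         if character.isdigit():
--             return int(character)
--         else:
--             pass
--
-- def get_numeric_value(token):
--     num_dict = {
--         "[C]": 0,
--         "[Ring1]": 1,
--         "[Ring2]": 2,
--         "[Branch1]": 3,
--         "[=Branch1]": 4,
--         "[#Branch1]": 5,
--         "[Branch2]": 6,
--         "[=Branch2]": 7,
--         "[#Branch2]": 8,
--         "[O]": 9,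
--         "[N]": 10,
--         "[=N]": 11,
--         "[=C]": 12,
--         "[#C]": 13,
--         "[S]": 14,
--         "[P]": 15,
--     }
--     return num_dict[token]
--
-- def connect_len(i, nb_num_token, selfies_token):
--     num = 1
--     for j in range(1, nb_num_token + 1):
--         num += get_numeric_value(selfies_token[i + j]) * (16 ** (nb_num_token - j))
--     return num
--
-- def token_classify(selfies_token):
--     atoms_idx_list = []
--     branch_idx_list = []
--     ring_idx_list = []
--     n = len(selfies_token)
--     i = 0
--     while i < n:
--         token = selfies_token[i]
--         if token.find("Branch") != -1:
--             nb_num_token = find_int(token)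
--             num = connect_len(i, nb_num_token, selfies_token)
--             branch_idx_list.append([i, nb_num_token, num])
--             i += nb_num_token + 1
--         elif token.find("Ring") != -1:
--             nb_num_token = find_int(token)
--             num = connect_len(i, nb_num_token, selfies_token)
--             ring_idx_list.append([i, nb_num_token, num])
--             i += nb_num_token + 1
--         else:
--             atoms_idx_list.append(i)
--             i += 1
--     return atoms_idx_list, branch_idx_list, ring_idx_list
-- ===== Notes on version B (the rewrite author's own statement) =====
-- stated objective: simpler
-- what changed: Replaces A's enumerate-over-all-indices loop with a maintained skip_list and per-index membership test by a single while loop over an explicit cursor that jumps past each Branch/Ring token's numeric block, so the skip_list disappears entirely.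
import Mathlib
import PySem

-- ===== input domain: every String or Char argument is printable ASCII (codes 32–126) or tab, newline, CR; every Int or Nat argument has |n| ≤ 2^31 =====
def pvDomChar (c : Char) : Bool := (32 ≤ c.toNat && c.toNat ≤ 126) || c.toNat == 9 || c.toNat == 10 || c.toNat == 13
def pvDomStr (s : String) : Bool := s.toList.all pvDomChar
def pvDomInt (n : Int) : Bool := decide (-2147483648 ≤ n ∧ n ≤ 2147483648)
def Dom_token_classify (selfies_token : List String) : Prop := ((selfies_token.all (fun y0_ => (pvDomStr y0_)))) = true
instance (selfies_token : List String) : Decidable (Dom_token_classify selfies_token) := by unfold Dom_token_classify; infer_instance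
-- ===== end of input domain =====

-- B replaces A's enumerate-and-skip_list scan by a single while loop over an explicit
-- cursor that jumps past the numeric block of each Branch/Ring token (objective: simpler).

-- ===== PORT A =====

-- find_int: first digit character of the token, as its int value; none = Python returns None.
-- int(c) for a single ASCII digit character is c.toNat - 48 (exact on the printable-ASCII Dom).
def findIntChars : List Char → Option Int
  | [] => none
  | c :: rest => if PySem.Chars.isdigit c then some ((c.toNat - 48 : Nat) : Int) else findIntChars rest

def find_int (token : String) : Option Int := findIntChars token.toList

def numDict : PySem.Dict String Int := PySem.Dict.ofList
  [("[C]", 0), ("[Ring1]", 1), ("[Ring2]", 2), ("[Branch1]", 3), ("[=Branch1]", 4),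
   ("[#Branch1]", 5), ("[Branch2]", 6), ("[=Branch2]", 7), ("[#Branch2]", 8), ("[O]", 9),
   ("[N]", 10), ("[=N]", 11), ("[=C]", 12), ("[#C]", 13), ("[S]", 14), ("[P]", 15)]

-- get_numeric_value: dict lookup; none = KeyError (excluded by Pre_).
def get_numeric_value (token : String) : Option Int := numDict.get? token

-- calculate_len_connect; the .getD defaults are hit exactly where Python raises
-- (IndexError / KeyError), excluded by Pre_; (nb - j).toNat is exact since j ≤ nb in the range.
def calculate_len_connect (i nb : Int) (selfies_token : List String) : Int × List Int :=
  (((PySem.List.pyRange 1 (nb + 1) 1).foldl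
      (fun (acc : Int × List Int) j =>
        (acc.1 + (get_numeric_value (PySem.List.pyGetD selfies_token (i + j) "")).getD 0
                   * (16 : Int) ^ (nb - j).toNat,
         acc.2 ++ [i + j]))
      (0, [])).1 + 1,
   ((PySem.List.pyRange 1 (nb + 1) 1).foldl
      (fun (acc : Int × List Int) j =>
        (acc.1 + (get_numeric_value (PySem.List.pyGetD selfies_token (i + j) "")).getD 0
                   * (16 : Int) ^ (nb - j).toNat,
         acc.2 ++ [i + j]))
      (0, [])).2)

-- one iteration of A's for-loop body; state = ((atoms, branches, rings), skip_list).
-- (find_int token).getD 0 : Python raises (TypeError in range) when find_int returns None — excluded by Pre_.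
def tcStepA (selfies_token : List String)
    (st : (List Int × List (List Int) × List (List Int)) × List Int)
    (p : Int × String) : (List Int × List (List Int) × List (List Int)) × List Int :=
  if p.1 ∈ st.2 then st
  else if PySem.Str.find p.2 "Branch" ≠ -1 then
    let nb := (find_int p.2).getD 0
    let r := calculate_len_connect p.1 nb selfies_token
    ((st.1.1, st.1.2.1 ++ [[p.1, nb, r.1]], st.1.2.2), st.2 ++ r.2)
  else if PySem.Str.find p.2 "Ring" ≠ -1 then
    let nb := (find_int p.2).getD 0
    let r := calculate_len_connect p.1 nb selfies_token
    ((st.1.1, st.1.2.1, st.1.2.2 ++ [[p.1, nb, r.1]]), st.2 ++ r.2)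
  else ((st.1.1 ++ [p.1], st.1.2.1, st.1.2.2), st.2)

def token_classify (selfies_token : List String) : List Int × List (List Int) × List (List Int) :=
  ((PySem.List.enumerate selfies_token 0).foldl (tcStepA selfies_token) (([], [], []), [])).1

-- ===== PORT B =====

-- B's inner for-loop computing num (starts at 1, accumulating the base-16 digits).
def connect_len (i nb : Int) (selfies_token : List String) : Int :=
  (PySem.List.pyRange 1 (nb + 1) 1).foldl
    (fun num j =>
      num + (get_numeric_value (PySem.List.pyGetD selfies_token (i + j) "")).getD 0
              * (16 : Int) ^ (nb - j).toNat) 1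

-- B's while loop: cursor i, three accumulator lists carried along.
def tcGoB (selfies_token : List String) (i : Nat)
    (atoms : List Int) (branches rings : List (List Int)) :
    List Int × List (List Int) × List (List Int) :=
  if h : i < selfies_token.length then
    let token := selfies_token[i]
    if PySem.Str.find token "Branch" ≠ -1 then
      let nb := (find_int token).getD 0
      let num := connect_len i nb selfies_token
      tcGoB selfies_token (i + nb.toNat + 1) atoms (branches ++ [[(i : Int), nb, num]]) rings
    else if PySem.Str.find token "Ring" ≠ -1 then
      let nb := (find_int token).getD 0
      let num := connect_len i nb selfies_token
      tcGoB selfies_token (i + nb.toNat + 1) atoms branches (rings ++ [[(i : Int), nb, num]])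
    else
      tcGoB selfies_token (i + 1) (atoms ++ [(i : Int)]) branches rings
  else (atoms, branches, rings)
termination_by selfies_token.length - i
decreasing_by all_goals omega

def token_classify_alt (selfies_token : List String) : List Int × List (List Int) × List (List Int) :=
  tcGoB selfies_token 0 [] [] []

-- ===== PRECONDITION & SPEC =====

-- The sixteen tokens of the module's numeric dictionary (Pre_'s own copy; Pre_ shares no code with the ports).
def selfiesKeys : List String :=
  ["[C]", "[Ring1]", "[Ring2]", "[Branch1]", "[=Branch1]", "[#Branch1]", "[Branch2]",
   "[=Branch2]", "[#Branch2]", "[O]", "[N]", "[=N]", "[=C]", "[#C]", "[S]", "[P]"]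

-- First ASCII digit of a token, if any.
def firstDigit? (t : String) : Option Nat :=
  (t.toList.find? PySem.Chars.isdigit).map (fun c => c.toNat - 48)

-- The input grammar, as a left-to-right automaton: a well-formed fragment list is a sequence of
-- units, where a unit is either an atom token (no "Branch"/"Ring" substring) or a Branch/Ring head
-- carrying a digit d followed by its d numeric tokens, each a key of the numeric dictionary, all
-- inside the list; 'pending' counts the numeric tokens the current unit still owes.
def selfiesWFGo : List String → Nat → Bool
  | [], pending => pending == 0
  | t :: rest, pending =>
    if pending > 0 then selfiesKeys.contains t && selfiesWFGo rest (pending - 1)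
    else if (PySem.Str.find t "Branch" != -1) || (PySem.Str.find t "Ring" != -1) then
      match firstDigit? t with
      | none => false
      | some d => selfiesWFGo rest d
    else selfiesWFGo rest 0

def selfiesWF (selfies_token : List String) : Bool := selfiesWFGo selfies_token 0

-- Pre_ holds exactly on the inputs where Python A returns: the list parses as a sequence of
-- SELFIES units (grammar above); on every other input A raises (TypeError when a Branch/Ring
-- head has no digit, IndexError when its numeric block runs past the end, KeyError when a
-- numeric token is not a dictionary key) — and B raises there too. No returning input is excluded.
def Pre_token_classify (selfies_token : List String) : Prop := selfiesWF selfies_token = true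

instance (selfies_token : List String) : Decidable (Pre_token_classify selfies_token) := by
  unfold Pre_token_classify; infer_instance

def pvWitness_token_classify : List String := ["[C]", "[Branch1]", "[O]", "[N]", "[Ring1]", "[C]"]

def Spec_token_classify (selfies_token : List String) (out : List Int × List (List Int) × List (List Int)) : Prop := out = token_classify_alt selfies_token
instance (selfies_token : List String) (out : List Int × List (List Int) × List (List Int)) : Decidable (Spec_token_classify selfies_token out) := by unfold Spec_token_classify; infer_instance

-- ===== CLAIM (what is proved, stated in full; the proofs are below) =====
def Claim_equal_token_classify : Prop := ∀ (selfies_token : List String), Dom_token_classify selfies_token → Pre_token_classify selfies_token → Spec_token_classify selfies_token (token_classify selfies_token)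

-- ===== LEMMAS AND PROOFS =====

lemma findIntChars_nonneg : ∀ (cs : List Char) (n : Int), findIntChars cs = some n → 0 ≤ n := by
  intro cs
  induction cs with
  | nil => intro n h; simp [findIntChars] at h
  | cons c rest ih =>
      intro n h
      by_cases hd : PySem.Chars.isdigit c
      · simp [findIntChars, hd] at h
        omega
      · simp [findIntChars, hd] at h
        exact ih n h

lemma find_int_nonneg (token : String) : 0 ≤ (find_int token).getD 0 := by
  unfold find_int
  cases h : findIntChars token.toList with
  | none => simp
  | some n => simpa using findIntChars_nonneg _ _ h

-- A's paired fold (num, skip_idx) splits into B's scalar fold and a map.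
lemma calc_fold_split (i nb : Int) (s : List String) (l : List Int) (a : Int) (b : List Int) :
    l.foldl (fun (acc : Int × List Int) j =>
        (acc.1 + (get_numeric_value (PySem.List.pyGetD s (i + j) "")).getD 0
                   * (16 : Int) ^ (nb - j).toNat,
         acc.2 ++ [i + j])) (a, b)
      = (l.foldl (fun num j =>
            num + (get_numeric_value (PySem.List.pyGetD s (i + j) "")).getD 0
                    * (16 : Int) ^ (nb - j).toNat) a,
         b ++ l.map (fun j => i + j)) := by
  induction l generalizing a b with
  | nil => simp
  | cons x xs ih => simp [ih]

lemma calculate_eq_connect (i nb : Int) (s : List String) :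
    calculate_len_connect i nb s
      = (connect_len i nb s, (PySem.List.pyRange 1 (nb + 1) 1).map (fun j => i + j)) := by
  unfold calculate_len_connect connect_len
  rw [calc_fold_split]
  refine Prod.ext ?_ (by simp)
  simp only
  rw [PySem.List.foldl_add, PySem.List.foldl_add]
  ring

-- Invariant induction: A's fold over the enumerate suffix starting at index i, with a skip_list
-- whose pending part is exactly {i, …, i+k-1}, computes what B's cursor loop computes from i+k.
lemma goA_eq_goB (s : List String) :
    ∀ (m i k : Nat) (atoms : List Int) (branches rings : List (List Int)) (skip : List Int),
      s.length - i ≤ m →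
      (∀ x ∈ skip, x < ((i + k : Nat) : Int)) →
      (∀ t : Nat, i ≤ t → t < i + k → (t : Int) ∈ skip) →
      ((PySem.List.enumerate (s.drop i) (i : Int)).foldl (tcStepA s)
          ((atoms, branches, rings), skip)).1
        = tcGoB s (i + k) atoms branches rings := by
  intro m
  induction m with
  | zero =>
      intro i k atoms branches rings skip hm _ _
      have hlen : s.length ≤ i := by omega
      have hnl : ¬ (i + k < s.length) := by omega
      rw [List.drop_eq_nil_of_le hlen, tcGoB]
      simp [PySem.List.enumerate_nil, hnl]
  | succ m ih =>
      intro i k atoms branches rings skip hm hub hmem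
      by_cases hi : i < s.length
      · rw [List.drop_eq_getElem_cons hi, PySem.List.enumerate_cons, List.foldl_cons]
        by_cases hk : 0 < k
        · -- current index is in the pending skip block
          have hin : (i : Int) ∈ skip := hmem i le_rfl (by omega)
          have hstep : tcStepA s ((atoms, branches, rings), skip) ((i : Int), s[i]) =
              ((atoms, branches, rings), skip) := by
            simp [tcStepA, hin]
          rw [hstep]
          have := ih (i + 1) (k - 1) atoms branches rings skip (by omega)
            (by intro x hx; have := hub x hx; push_cast; push_cast at this; omega)
            (by intro t ht1 ht2; exact hmem t (by omega) (by omega))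
          have harg : ((i : Int) + 1) = ((i + 1 : Nat) : Int) := by push_cast; ring
          rw [harg]
          rw [this]
          congr 1
          omega
        · -- k = 0 : current index is processed
          have hk0 : k = 0 := by omega
          subst hk0
          have hnotin : (i : Int) ∉ skip := by
            intro hin
            have := hub _ hin
            simp at this
          have harg : ((i : Int) + 1) = ((i + 1 : Nat) : Int) := by push_cast; ring
          set tok := s[i] with htok
          by_cases hB : PySem.Str.find tok "Branch" ≠ -1
          · set nb := (find_int tok).getD 0 with hnb
            have hnbnn : 0 ≤ nb := find_int_nonneg tok
            have hstep : tcStepA s ((atoms, branches, rings), skip) ((i : Int), tok) =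
                ((atoms, branches ++ [[(i : Int), nb, connect_len i nb s]], rings),
                 skip ++ (PySem.List.pyRange 1 (nb + 1) 1).map (fun j => (i : Int) + j)) := by
              simp only [tcStepA, if_neg hnotin, if_pos hB, calculate_eq_connect, ← hnb]
            rw [hstep]
            have hrec := ih (i + 1) nb.toNat atoms
              (branches ++ [[(i : Int), nb, connect_len i nb s]]) rings
              (skip ++ (PySem.List.pyRange 1 (nb + 1) 1).map (fun j => (i : Int) + j))
              (by omega)
              (by
                intro x hx
                rcases List.mem_append.mp hx with hold | hnew
                · have := hub x hold; push_cast; push_cast at this; omega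
                · rcases List.mem_map.mp hnew with ⟨j, hj, rfl⟩
                  have := PySem.List.mem_pyRange_one.mp hj
                  push_cast
                  omega)
              (by
                intro t ht1 ht2
                refine List.mem_append.mpr (Or.inr ?_)
                refine List.mem_map.mpr ⟨(t : Int) - i, ?_, by ring⟩
                refine PySem.List.mem_pyRange_one.mpr ?_
                exact ⟨by omega, by omega⟩)
            rw [harg, hrec, show i + 1 + nb.toNat = i + nb.toNat + 1 from by omega]
            conv_rhs => rw [Nat.add_zero, tcGoB]
            simp only [hi, dif_pos, ← htok, ← hnb, if_pos hB]
          · by_cases hR : PySem.Str.find tok "Ring" ≠ -1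
            · set nb := (find_int tok).getD 0 with hnb
              have hnbnn : 0 ≤ nb := find_int_nonneg tok
              have hstep : tcStepA s ((atoms, branches, rings), skip) ((i : Int), tok) =
                  ((atoms, branches, rings ++ [[(i : Int), nb, connect_len i nb s]]),
                   skip ++ (PySem.List.pyRange 1 (nb + 1) 1).map (fun j => (i : Int) + j)) := by
                simp only [tcStepA, if_neg hnotin, if_neg hB, if_pos hR, calculate_eq_connect, ← hnb]
              rw [hstep]
              have hrec := ih (i + 1) nb.toNat atoms branches
                (rings ++ [[(i : Int), nb, connect_len i nb s]])
                (skip ++ (PySem.List.pyRange 1 (nb + 1) 1).map (fun j => (i : Int) + j))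
                (by omega)
                (by
                  intro x hx
                  rcases List.mem_append.mp hx with hold | hnew
                  · have := hub x hold; push_cast; push_cast at this; omega
                  · rcases List.mem_map.mp hnew with ⟨j, hj, rfl⟩
                    have := PySem.List.mem_pyRange_one.mp hj
                    push_cast
                    omega)
                (by
                  intro t ht1 ht2
                  refine List.mem_append.mpr (Or.inr ?_)
                  refine List.mem_map.mpr ⟨(t : Int) - i, ?_, by ring⟩
                  refine PySem.List.mem_pyRange_one.mpr ?_
                  exact ⟨by omega, by omega⟩)
              rw [harg, hrec, show i + 1 + nb.toNat = i + nb.toNat + 1 from by omega]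
              conv_rhs => rw [Nat.add_zero, tcGoB]
              simp only [hi, dif_pos, ← htok, ← hnb, if_neg hB, if_pos hR]
            · -- atom
              have hstep : tcStepA s ((atoms, branches, rings), skip) ((i : Int), tok) =
                  ((atoms ++ [(i : Int)], branches, rings), skip) := by
                simp only [tcStepA, if_neg hnotin, if_neg hB, if_neg hR]
              rw [hstep]
              have hrec := ih (i + 1) 0 (atoms ++ [(i : Int)]) branches rings skip (by omega)
                (by intro x hx; have := hub x hx; push_cast; push_cast at this; omega)
                (by intro t ht1 ht2; omega)
              rw [harg, hrec]
              conv_rhs => rw [Nat.add_zero, tcGoB]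
              simp only [hi, dif_pos, ← htok, if_neg hB, if_neg hR]
      · have hlen : s.length ≤ i := by omega
        have hnl : ¬ (i + k < s.length) := by omega
        rw [List.drop_eq_nil_of_le hlen, tcGoB]
        simp [PySem.List.enumerate_nil, hnl]

-- ===== VERDICT (by name: the statement is the Claim_ definition above) =====
theorem token_classify_spec : Claim_equal_token_classify := by
  intro s _ _
  unfold Spec_token_classify token_classify token_classify_alt
  have := goA_eq_goB s s.length 0 0 [] [] [] [] (by omega) (by simp) (by omega)
  simpa using this
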